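-- pv_equiv track=rewrite | github.com/szu-advtech/AdvTech | 2022/31-全俊熠 指导老师-吴定明/procedure/generation.py | select_min_key_with_smallest_value
-- ===== SOURCE A (Python) =====
-- def select_min_key_with_smallest_value(dic):
--     # 初始一个非常大的值
--     min_value = float("inf")
--     # 保存最小value的所有key
--     min_value_keys = set()
--     for key in dic.keys():
--         # 小于最小值
--         if dic[key] < min_value:
--             # 更新最小值
--             min_value = dic[key]
--             # 清空keys集合
--             min_value_keys = set()
--             # 添加这个key
--             min_value_keys.add(key)
--         # 相同最小值error
--         elif dic[key] == min_value:
--             min_value_keys.add(key)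
--     # 选择key最小的
--     return min(min_value_keys)
-- ===== SOURCE B (Python) =====
-- def select_min_key_with_smallest_value(dic):
--     m = min(dic.values())
--     return min(k for k, v in dic.items() if v == m)
-- ===== Notes on version B (the rewrite author's own statement) =====
-- stated objective: simpler
-- what changed: replaces the single scan that maintains a running minimum plus a set of tying keys with a two-pass decomposition: first take the minimum of the values, then take the minimum key among the entries whose value equals it
import Mathlib
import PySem

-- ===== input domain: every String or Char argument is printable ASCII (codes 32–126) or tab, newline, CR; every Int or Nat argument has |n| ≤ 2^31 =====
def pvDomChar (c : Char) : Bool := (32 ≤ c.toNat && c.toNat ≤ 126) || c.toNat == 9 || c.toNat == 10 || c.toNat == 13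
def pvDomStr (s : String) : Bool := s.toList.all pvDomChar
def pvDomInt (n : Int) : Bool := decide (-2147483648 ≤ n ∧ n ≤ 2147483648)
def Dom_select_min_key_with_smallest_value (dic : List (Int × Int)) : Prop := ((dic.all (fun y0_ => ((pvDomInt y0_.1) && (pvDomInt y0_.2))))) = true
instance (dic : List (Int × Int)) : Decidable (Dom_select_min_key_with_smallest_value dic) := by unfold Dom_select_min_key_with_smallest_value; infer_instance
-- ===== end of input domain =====

-- B replaces A's single scan (running min + set of tying keys) with a two-pass
-- decomposition: min of the values, then min key among entries at that value (objective: simpler).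

-- ===== PORT A =====
-- loop body of A's 'for key in dic.keys()': min_value is Option Int (none = float("inf"));
-- g key stands for dic[key] (total here: every looked-up key comes from dic.keys()).
def pvLoopA (g : Int → Int) (st : Option Int × PySem.Set Int) (key : Int) : Option Int × PySem.Set Int :=
  match st.1 with
  | none => (some (g key), PySem.Set.add PySem.Set.empty key)
  | some m =>
    if g key < m then (some (g key), PySem.Set.add PySem.Set.empty key)
    else if g key = m then (st.1, PySem.Set.add st.2 key)
    else st

def select_min_key_with_smallest_value (dic : List (Int × Int)) : Int :=
  let d := PySem.Dict.ofList dic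
  let st := d.keys.foldl (pvLoopA (fun k => d.getD k 0)) (none, PySem.Set.empty)
  -- min(min_value_keys); empty set (Python ValueError) is excluded by Pre_
  (PySem.List.min? st.2 (fun x => x)).getD 0

-- ===== PORT B =====
def select_min_key_with_smallest_value_alt (dic : List (Int × Int)) : Int :=
  let d := PySem.Dict.ofList dic
  -- m = min(dic.values()); empty dict (Python ValueError) is excluded by Pre_
  let m := (PySem.List.min? d.values (fun x => x)).getD 0
  -- min(k for k, v in dic.items() if v == m)
  (PySem.List.min? ((d.items.filter (fun p => p.2 == m)).map (fun p => p.1)) (fun x => x)).getD 0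

-- ===== PRECONDITION & SPEC =====
-- A raises ValueError (min of an empty set) on the empty dict; that input is excluded.
def Pre_select_min_key_with_smallest_value (dic : List (Int × Int)) : Prop := dic ≠ []
instance (dic : List (Int × Int)) : Decidable (Pre_select_min_key_with_smallest_value dic) := by unfold Pre_select_min_key_with_smallest_value; infer_instance
def pvWitness_select_min_key_with_smallest_value : (List (Int × Int)) := [(1, 2), (3, 2)]

def Spec_select_min_key_with_smallest_value (dic : List (Int × Int)) (out : Int) : Prop := out = select_min_key_with_smallest_value_alt dic
instance (dic : List (Int × Int)) (out : Int) : Decidable (Spec_select_min_key_with_smallest_value dic out) := by unfold Spec_select_min_key_with_smallest_value; infer_instance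

-- ===== CLAIM (what is proved, stated in full; the proofs are below) =====
def Claim_equal_select_min_key_with_smallest_value : Prop := ∀ (dic : List (Int × Int)), Dom_select_min_key_with_smallest_value dic → Pre_select_min_key_with_smallest_value dic → Spec_select_min_key_with_smallest_value dic (select_min_key_with_smallest_value dic)

-- ===== LEMMAS AND PROOFS =====

theorem pv_foldl_min_le_init (l : List Int) (M : Int) : l.foldl min M ≤ M := by
  induction l generalizing M with
  | nil => simp
  | cons x t ih => exact le_trans (ih (min M x)) (min_le_left _ _)

-- second component of A's loop state: membership characterisation
theorem pv_loopA_snd (g : Int → Int) (ks : List Int) (M : Int) (s : PySem.Set Int) (a : Int) :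
    a ∈ (ks.foldl (pvLoopA g) (some M, s)).2 ↔
      ((ks.map g).foldl min M = M ∧ a ∈ s) ∨ (a ∈ ks ∧ g a = (ks.map g).foldl min M) := by
  induction ks generalizing M s with
  | nil => simp
  | cons k t ih =>
    simp only [List.foldl_cons, List.map_cons, pvLoopA]
    by_cases h1 : g k < M
    · simp only [h1, if_true]
      rw [min_eq_right (le_of_lt h1)]
      have hle : (t.map g).foldl min (g k) ≤ g k := pv_foldl_min_le_init _ _
      rw [ih]
      simp only [PySem.Set.mem_add, PySem.Set.empty, List.not_mem_nil, false_or, List.mem_cons]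
      constructor
      · rintro (⟨hF, rfl⟩ | ⟨ha, hga⟩)
        · exact Or.inr ⟨Or.inl rfl, hF.symm⟩
        · exact Or.inr ⟨Or.inr ha, hga⟩
      · rintro (⟨hF, _⟩ | ⟨(rfl | ha), hga⟩)
        · omega
        · exact Or.inl ⟨hga.symm, rfl⟩
        · exact Or.inr ⟨ha, hga⟩
    · by_cases h2 : g k = M
      · simp only [h2, lt_irrefl, if_false, if_true]
        rw [min_self, ih]
        simp only [PySem.Set.mem_add, List.mem_cons]
        constructor
        · rintro (⟨hF, (hs | rfl)⟩ | ⟨ha, hga⟩)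
          · exact Or.inl ⟨hF, hs⟩
          · exact Or.inr ⟨Or.inl rfl, by omega⟩
          · exact Or.inr ⟨Or.inr ha, hga⟩
        · rintro (⟨hF, hs⟩ | ⟨(rfl | ha), hga⟩)
          · exact Or.inl ⟨hF, Or.inl hs⟩
          · exact Or.inl ⟨by omega, Or.inr rfl⟩
          · exact Or.inr ⟨ha, hga⟩
      · simp only [h1, if_false, h2, if_false]
        rw [min_eq_left (by omega), ih]
        have hle : (t.map g).foldl min M ≤ M := pv_foldl_min_le_init _ _
        simp only [List.mem_cons]
        constructor
        · rintro (⟨hF, hs⟩ | ⟨ha, hga⟩)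
          · exact Or.inl ⟨hF, hs⟩
          · exact Or.inr ⟨Or.inr ha, hga⟩
        · rintro (⟨hF, hs⟩ | ⟨(rfl | ha), hga⟩)
          · exact Or.inl ⟨hF, hs⟩
          · omega
          · exact Or.inr ⟨ha, hga⟩

-- min? with the identity key is determined by membership
theorem pv_min?_id_congr (xs ys : List Int) (h : ∀ a : Int, a ∈ xs ↔ a ∈ ys) :
    PySem.List.min? xs (fun x => x) = PySem.List.min? ys (fun x => x) := by
  cases hx : PySem.List.min? xs (fun x => x) with
  | none =>
    have : xs = [] := by simpa [PySem.List.min?_eq_none_iff] using hx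
    subst this
    have : ys = [] := by
      cases ys with
      | nil => rfl
      | cons b t => exact absurd ((h b).mpr (List.mem_cons_self)) (by simp)
    subst this
    exact hx.symm
  | some m =>
    cases hy : PySem.List.min? ys (fun x => x) with
    | none =>
      have : ys = [] := by simpa [PySem.List.min?_eq_none_iff] using hy
      subst this
      exact absurd ((h m).mp (PySem.List.min?_mem hx)) (by simp)
    | some n =>
      have hnm : n ≤ m := PySem.List.min?_isMin hy m ((h m).mp (PySem.List.min?_mem hx))
      have hmn : m ≤ n := PySem.List.min?_isMin hx n ((h n).mpr (PySem.List.min?_mem hy))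
      exact congrArg some (le_antisymm hmn hnm)

theorem pv_keys_ofList (dic : List (Int × Int)) :
    (PySem.Dict.ofList dic).keys = PySem.Set.ofList (dic.map Prod.fst) := by
  show (dic.foldl (fun d p => d.insert p.1 p.2) PySem.Dict.empty).keys = _
  rw [PySem.Dict.keys_foldl_insert_key dic Prod.fst (fun d p => p.2) PySem.Dict.empty]
  simp [PySem.Set.update_nil_left, PySem.Dict.keys_empty]

-- ===== VERDICT (by name: the statement is the Claim_ definition above) =====
theorem select_min_key_with_smallest_value_spec : Claim_equal_select_min_key_with_smallest_value := by
  intro dic _ hpre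
  replace hpre : dic ≠ [] := hpre
  unfold Spec_select_min_key_with_smallest_value
  simp only [select_min_key_with_smallest_value, select_min_key_with_smallest_value_alt]
  obtain ⟨p, rest, rfl⟩ := List.exists_cons_of_ne_nil hpre
  have hnd : (PySem.Dict.ofList (p :: rest)).keys.Nodup := PySem.Dict.nodup_keys_ofList (p :: rest)
  have hne : (PySem.Dict.ofList (p :: rest)).keys ≠ [] := by
    intro hcon
    have hp : p.1 ∈ (PySem.Dict.ofList (p :: rest)).keys := by
      rw [pv_keys_ofList, PySem.Set.mem_ofList]
      exact List.mem_map_of_mem (show p ∈ p :: rest from List.mem_cons_self)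
    rw [hcon] at hp
    simp at hp
  obtain ⟨k, t, hks⟩ := List.exists_cons_of_ne_nil hne
  have hvals : (PySem.Dict.ofList (p :: rest)).values
      = (k :: t).map (fun x => (PySem.Dict.ofList (p :: rest)).getD x 0) := by
    rw [PySem.Dict.values_eq_map_keys _ hnd 0, hks]
  have hitems : (PySem.Dict.ofList (p :: rest)).items
      = (k :: t).map (fun x => (x, (PySem.Dict.ofList (p :: rest)).getD x 0)) := by
    rw [PySem.Dict.items_eq_map_keys _ hnd 0, hks]
  rw [hks, hvals, hitems, List.map_cons, PySem.List.min?_id_cons]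
  set g : Int → Int := fun x => (PySem.Dict.ofList (p :: rest)).getD x 0 with hg
  set F : Int := List.foldl min (g k) (t.map g) with hF
  have hstep : (k :: t).foldl (pvLoopA g) (none, PySem.Set.empty)
      = t.foldl (pvLoopA g) (some (g k), PySem.Set.add PySem.Set.empty k) := rfl
  rw [hstep]
  refine congrArg (fun o => Option.getD o 0) (pv_min?_id_congr _ _ ?_)
  intro a
  rw [pv_loopA_snd]
  simp only [Option.getD_some, List.mem_map, List.mem_filter, List.mem_cons,
    PySem.Set.mem_add, beq_iff_eq]
  constructor
  · rintro (⟨hFk, (hmem | rfl)⟩ | ⟨ha, hga⟩)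
    · exact absurd hmem (by simp [PySem.Set.empty])
    · exact ⟨(a, g a), ⟨⟨a, Or.inl rfl, rfl⟩, hFk.symm⟩, rfl⟩
    · exact ⟨(a, g a), ⟨⟨a, Or.inr ha, rfl⟩, hga⟩, rfl⟩
  · rintro ⟨q, ⟨⟨x, hx, rfl⟩, hv⟩, rfl⟩
    rcases hx with rfl | hx
    · exact Or.inl ⟨hv.symm, Or.inr rfl⟩
    · exact Or.inr ⟨hx, hv⟩
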